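-- pv_equiv track=rewrite | github.com/472mbah/path-finding | algorithms/mg2.py | othersInProximity
-- ===== SOURCE A (Python) =====
-- def othersInProximity (areaCords, blockers):
--     options = [
--         (areaCords[0]+1, areaCords[1]),
--         (areaCords[0]-1, areaCords[1]),
--         (areaCords[0], areaCords[1]+1),
--         (areaCords[0], areaCords[1]-1),
--         (areaCords[0]+1, areaCords[1]+1),
--         (areaCords[0]+1, areaCords[1]-1),
--         (areaCords[0]-1, areaCords[1]+1),
--         (areaCords[0]-1, areaCords[1]-1),
--     ]
--     for option in options:
--         if option in blockers:
--             return False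
--     return True
-- ===== SOURCE B (Python) =====
-- def othersInProximity(areaCords, blockers):
--     for b in blockers:
--         dx = b[0] - areaCords[0]
--         dy = b[1] - areaCords[1]
--         if dx in (-1, 0, 1) and dy in (-1, 0, 1) and not (dx == 0 and dy == 0):
--             return False
--     return True
-- ===== Notes on version B (the rewrite author's own statement) =====
-- stated objective: alternative
-- what changed: Instead of materialising the 8 neighbor cells and testing each for membership in blockers (8 scans of the list), B makes a single pass over blockers and tests each blocker's offset from areaCords for exact membership in (-1,0,1) on both axes, excluding the center.
import Mathlib
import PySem

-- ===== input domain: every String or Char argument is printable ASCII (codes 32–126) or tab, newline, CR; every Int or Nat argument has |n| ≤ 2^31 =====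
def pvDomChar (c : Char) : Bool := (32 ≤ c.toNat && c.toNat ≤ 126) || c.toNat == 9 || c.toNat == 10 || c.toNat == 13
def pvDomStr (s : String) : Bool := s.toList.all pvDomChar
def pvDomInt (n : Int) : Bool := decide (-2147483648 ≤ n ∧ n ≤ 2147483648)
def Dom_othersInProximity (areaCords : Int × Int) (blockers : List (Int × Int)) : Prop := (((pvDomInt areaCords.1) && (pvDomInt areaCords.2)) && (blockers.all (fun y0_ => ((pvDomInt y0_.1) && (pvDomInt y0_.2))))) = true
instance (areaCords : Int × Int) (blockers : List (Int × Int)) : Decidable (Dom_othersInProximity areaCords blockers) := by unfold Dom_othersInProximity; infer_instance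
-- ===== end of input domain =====

-- B replaces A's 8 neighbor-cell membership scans with one pass over blockers testing each offset (alternative decomposition, same exact behaviour).
-- ===== PORT A =====
-- A builds the 8 neighbor cells and returns False on the first one found in blockers.
def aLoop (blockers : List (Int × Int)) : List (Int × Int) → Bool
  | [] => true
  | o :: rest => if o ∈ blockers then false else aLoop blockers rest

def othersInProximity (areaCords : Int × Int) (blockers : List (Int × Int)) : Bool :=
  let options : List (Int × Int) :=
    [ (areaCords.1 + 1, areaCords.2),
      (areaCords.1 - 1, areaCords.2),
      (areaCords.1, areaCords.2 + 1),
      (areaCords.1, areaCords.2 - 1),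
      (areaCords.1 + 1, areaCords.2 + 1),
      (areaCords.1 + 1, areaCords.2 - 1),
      (areaCords.1 - 1, areaCords.2 + 1),
      (areaCords.1 - 1, areaCords.2 - 1) ]
  aLoop blockers options

-- ===== PORT B =====
-- B: single pass over blockers, testing each blocker's offset from areaCords.
def bLoop (areaCords : Int × Int) : List (Int × Int) → Bool
  | [] => true
  | b :: rest =>
    let dx := b.1 - areaCords.1
    let dy := b.2 - areaCords.2
    if (dx = -1 ∨ dx = 0 ∨ dx = 1) ∧ (dy = -1 ∨ dy = 0 ∨ dy = 1) ∧ ¬(dx = 0 ∧ dy = 0)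
    then false else bLoop areaCords rest

def othersInProximity_alt (areaCords : Int × Int) (blockers : List (Int × Int)) : Bool :=
  bLoop areaCords blockers

-- ===== PRECONDITION & SPEC =====
def Spec_othersInProximity (areaCords : Int × Int) (blockers : List (Int × Int)) (out : Bool) : Prop := out = othersInProximity_alt areaCords blockers
instance (areaCords : Int × Int) (blockers : List (Int × Int)) (out : Bool) : Decidable (Spec_othersInProximity areaCords blockers out) := by unfold Spec_othersInProximity; infer_instance

-- ===== CLAIM (what is proved, stated in full; the proofs are below) =====
def Claim_equal_othersInProximity : Prop := ∀ (areaCords : Int × Int) (blockers : List (Int × Int)), Dom_othersInProximity areaCords blockers → Spec_othersInProximity areaCords blockers (othersInProximity areaCords blockers)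

-- ===== LEMMAS AND PROOFS =====


theorem aLoop_eq_all (blockers : List (Int × Int)) (opts : List (Int × Int)) :
    aLoop blockers opts = opts.all (fun o => decide (o ∉ blockers)) := by
  induction opts with
  | nil => rfl
  | cons o rest ih =>
    simp only [aLoop, List.all_cons, ih]
    by_cases h : o ∈ blockers <;> simp [h]

theorem bLoop_eq_all (areaCords : Int × Int) (bl : List (Int × Int)) :
    bLoop areaCords bl = bl.all (fun b =>
      decide (¬ ((b.1 - areaCords.1 = -1 ∨ b.1 - areaCords.1 = 0 ∨ b.1 - areaCords.1 = 1) ∧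
        (b.2 - areaCords.2 = -1 ∨ b.2 - areaCords.2 = 0 ∨ b.2 - areaCords.2 = 1) ∧
        ¬(b.1 - areaCords.1 = 0 ∧ b.2 - areaCords.2 = 0)))) := by
  induction bl with
  | nil => rfl
  | cons b rest ih =>
    simp only [bLoop, List.all_cons, ih]
    split_ifs with h
    · simp [h]
    · rw [decide_eq_true h, Bool.true_and]

-- ===== VERDICT (by name: the statement is the Claim_ definition above) =====
theorem othersInProximity_spec : Claim_equal_othersInProximity := by
  intro a bl _
  unfold Spec_othersInProximity othersInProximity othersInProximity_alt
  rw [aLoop_eq_all, bLoop_eq_all]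
  rw [Bool.eq_iff_iff]
  simp only [List.all_eq_true, decide_eq_true_eq]
  constructor
  · intro h b hb hc
    rcases hc with ⟨hx, hy, hne⟩
    have hmem : b ∈ [ (a.1 + 1, a.2), (a.1 - 1, a.2), (a.1, a.2 + 1), (a.1, a.2 - 1),
        (a.1 + 1, a.2 + 1), (a.1 + 1, a.2 - 1), (a.1 - 1, a.2 + 1), (a.1 - 1, a.2 - 1) ] := by
      simp only [List.mem_cons, List.not_mem_nil, or_false, Prod.ext_iff]
      omega
    exact h b hmem hb
  · intro h o ho hob
    apply h o hob
    simp only [List.mem_cons, List.not_mem_nil, or_false, Prod.ext_iff] at ho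
    omega
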